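-- pv_equiv track=rewrite | github.com/gmy2013/icse26_failure_refinement | gcd_sum_minimization/gcd_sum_minimization/main.py | minimize_gcd_sum
-- ===== SOURCE A (Python) =====
-- import math
-- from typing import List, Tuple
--
-- def minimize_gcd_sum(arr: List[int]) -> int:
--     """
--     Rearranges the array to minimize the sum of GCDs of all prefixes.
--
--     Args:
--         arr (List[int]): The input array.
--
--     Returns:
--         int: The minimal possible sum of GCDs of all prefixes.
--     """
--     n = len(arr)
--     used = [False] * n
--     result_sum = 0
--
--     # Start with the smallest element
--     min_idx = 0
--     for i in range(1, n):
--         if arr[i] < arr[min_idx]: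
--             min_idx = i
--     current_gcd = arr[min_idx]
--     used[min_idx] = True
--     result_sum += current_gcd
--
--     for _ in range(1, n):
--         min_next_gcd = None
--         min_idx_next = -1
--         for i in range(n):
--             if not used[i]:
--                 next_gcd = math.gcd(current_gcd, arr[i])
--                 if (min_next_gcd is None) or (next_gcd < min_next_gcd):
--                     min_next_gcd = next_gcd
--                     min_idx_next = i
--         used[min_idx_next] = True
--         current_gcd = min_next_gcd
--         result_sum += current_gcd
--
--     return result_sum
-- ===== SOURCE B (Python) =====
-- import math
-- from typing import List
--
-- def minimize_gcd_sum(arr: List[int]) -> int: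
--     """Iterates the pure map g -> min(gcd(g, x) for x in arr) over the whole,
--     unmodified array: removing already-chosen elements never changes this
--     minimum, so no used-flags, no shrinking copy and no per-step selection of
--     an element are needed.  Zeros (which would feed the g == 0 state
--     spuriously) are counted and settled up front, and the final fixpoint
--     plateau is added in bulk."""
--     n = len(arr)
--     g = min(arr)
--     done = 1
--     total = g
--     if g == 0:
--         done = arr.count(0)
--         if done == n:
--             return 0
--         g = min(x for x in arr if x != 0)
--         done += 1
--         total = g
--     while done < n:
--         d = min(math.gcd(g, x) for x in arr)
--         if d == g:
--             return total + g * (n - done)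
--         g = d
--         total += d
--         done += 1
--     return total
-- ===== Notes on version B (the rewrite author's own statement) =====
-- stated objective: faster
-- what changed: A maintains used-flags and, on each of the n-1 greedy steps, scans the unused elements to select and mark the minimizing element; B keeps no per-element state at all: it iterates the pure map g -> min(gcd(g,x) for x in arr) over the whole unmodified array (removing chosen elements provably never changes this minimum), counts and settles zeros up front, and bulk-adds the final fixpoint plateau, so only O(log V) strict-decrease passes are made.
-- outside the precondition, e.g. on minimize_gcd_sum([]): A raises IndexError, B raises ValueError
import Mathlib
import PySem

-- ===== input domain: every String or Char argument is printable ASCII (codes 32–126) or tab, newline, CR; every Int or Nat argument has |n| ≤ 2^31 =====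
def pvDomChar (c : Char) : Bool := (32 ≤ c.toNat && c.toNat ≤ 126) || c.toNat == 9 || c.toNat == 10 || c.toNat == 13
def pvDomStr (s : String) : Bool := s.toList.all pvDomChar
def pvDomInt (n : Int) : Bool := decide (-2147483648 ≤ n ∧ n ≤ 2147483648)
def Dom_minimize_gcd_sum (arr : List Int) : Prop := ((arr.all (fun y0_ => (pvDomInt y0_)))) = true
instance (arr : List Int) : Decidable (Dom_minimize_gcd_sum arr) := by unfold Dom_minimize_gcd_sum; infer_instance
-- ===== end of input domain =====

-- B drops A's used-flags/per-step element selection entirely: it iterates the pure map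
-- g ↦ min(gcd(g,x) for x in arr) on the whole unmodified array (removal never changes that
-- minimum), settles zeros up front by counting, and bulk-adds the final fixpoint plateau.

-- ===== PORT A =====
-- 'for i in range(1, n): if arr[i] < arr[min_idx]: min_idx = i'
def aMinIdx (arr : List Int) : Int :=
  (PySem.List.pyRange 1 (PySem.List.len arr) 1).foldl
    (fun mi i => if PySem.List.pyGetD arr i 0 < PySem.List.pyGetD arr mi 0 then i else mi) 0

-- the inner 'for i in range(n)' scan; (min_next_gcd, min_idx_next) carried as one Option
def aScan (arr : List Int) (g : Int) (used : List Bool) : Option (Int × Int) :=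
  (PySem.List.pyRange 0 (PySem.List.len arr) 1).foldl
    (fun best i =>
      if PySem.List.pyGetD used i true = false then
        let next : Int := (Int.gcd g (PySem.List.pyGetD arr i 0) : Int)
        match best with
        | none => some (next, i)
        | some bp => if next < bp.1 then some (next, i) else best
      else best) none

-- one iteration of the outer 'for _ in range(1, n)' loop over (used, current_gcd, result_sum)
def aStep (arr : List Int) (st : List Bool × Int × Int) : List Bool × Int × Int :=
  match aScan arr st.2.1 st.1 with
  | some di => (PySem.List.pySetD st.1 di.2 true, di.1, st.2.2 + di.1)
  | none => (PySem.List.pySetD st.1 (-1) true, st.2.1, st.2.2)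
  -- none: Python sets used[-1] and then raises adding None; unreachable for arr ≠ [] (Pre_)

def minimize_gcd_sum (arr : List Int) : Int :=
  let n : Int := PySem.List.len arr
  let mi : Int := aMinIdx arr
  let g0 : Int := PySem.List.pyGetD arr mi 0   -- arr[min_idx]; IndexError on [] (excluded by Pre_)
  let used0 : List Bool := PySem.List.pySetD (List.replicate n.toNat false) mi true
  let fin := (PySem.List.pyRange 1 n 1).foldl (fun st _ => aStep arr st) (used0, g0, g0)
  fin.2.2

-- ===== PORT B =====
-- 'd = min(math.gcd(g, x) for x in arr)' : a running min over the WHOLE array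
def fAll (arr : List Int) (g : Int) : Int :=
  match arr with
  | [] => 0   -- min() of an empty generator raises; unreachable under Pre_
  | x :: xs => xs.foldl (fun d y => min d ((Int.gcd g y : Int))) ((Int.gcd g x : Int))

-- 'while done < n: …' with k = n - done; no element is ever selected or removed
def bLoop (arr : List Int) : Int → Int → Nat → Int
  | _, tot, 0 => tot
  | g, tot, k + 1 =>
    let d := fAll arr g
    if d = g then tot + g * ((k + 1 : Nat) : Int)
    else bLoop arr d (tot + d) k

def minimize_gcd_sum_alt (arr : List Int) : Int :=
  match PySem.List.min? arr (fun x => x) with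
  | none => 0   -- min([]) raises ValueError; excluded by Pre_
  | some m =>
    if m = 0 then
      let z : Nat := PySem.List.count arr 0
      if z = arr.length then 0
      else
        match PySem.List.min? (arr.filter (fun x => decide (x ≠ 0))) (fun x => x) with
        | none => 0   -- unreachable: a nonzero element exists
        | some p => bLoop arr p p (arr.length - z - 1)
    else bLoop arr m m (arr.length - 1)

-- ===== PRECONDITION & SPEC =====
-- On [] A raises IndexError (and B's Python raises ValueError); everywhere else both return.
def Pre_minimize_gcd_sum (arr : List Int) : Prop := arr ≠ []
instance (arr : List Int) : Decidable (Pre_minimize_gcd_sum arr) := by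
  unfold Pre_minimize_gcd_sum; infer_instance

def pvWitness_minimize_gcd_sum : List Int := [6, 10, 15]

def Spec_minimize_gcd_sum (arr : List Int) (out : Int) : Prop := out = minimize_gcd_sum_alt arr
instance (arr : List Int) (out : Int) : Decidable (Spec_minimize_gcd_sum arr out) := by
  unfold Spec_minimize_gcd_sum; infer_instance

-- ===== CLAIM (what is proved, stated in full; the proofs are below) =====
def Claim_equal_minimize_gcd_sum : Prop := ∀ (arr : List Int), Dom_minimize_gcd_sum arr → Pre_minimize_gcd_sum arr → Spec_minimize_gcd_sum arr (minimize_gcd_sum arr)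

-- ===== LEMMAS AND PROOFS =====

-- ---- small Int gcd facts ----
theorem gcd_cast_dvd_left (a b : Int) : (Int.gcd a b : Int) ∣ a := Int.gcd_dvd_left a b
theorem gcd_cast_dvd_right (a b : Int) : (Int.gcd a b : Int) ∣ b := Int.gcd_dvd_right a b

theorem gcd_eq_abs_of_dvd (a b : Int) (h : a ∣ b) : (Int.gcd a b : Int) = |a| := by
  rw [Int.gcd_eq_natAbs_left h, Int.natCast_natAbs]

theorem gcd_le_abs (g x : Int) (h : g ≠ 0) : (Int.gcd g x : Int) ≤ |g| := by
  have h1 : Int.gcd g x ∣ g.natAbs := Int.gcd_dvd_natAbs_left g x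
  have h2 : 0 < g.natAbs := by omega
  have h3 := Nat.le_of_dvd h2 h1
  rw [← Int.natCast_natAbs]; exact_mod_cast h3

theorem gcd_cast_ne_zero (g x : Int) (h : g ≠ 0) : (Int.gcd g x : Int) ≠ 0 := by
  simp only [ne_eq, Int.natCast_eq_zero, Int.gcd_eq_zero_iff, not_and]
  intro hg; exact absurd hg h

theorem gcd_zero_of_nonneg (x : Int) (h : 0 ≤ x) : (Int.gcd 0 x : Int) = x := by
  simp [Int.gcd]; omega

-- ---- running-min fold ('min' of a nonempty list) ----
def listMin : List Int → Int
  | [] => 0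
  | x :: xs => xs.foldl min x

theorem foldl_min_le_init : ∀ (xs : List Int) (a : Int), xs.foldl min a ≤ a := by
  intro xs
  induction xs with
  | nil => intro a; simp
  | cons x t ih =>
    intro a
    calc t.foldl min (min a x) ≤ min a x := ih _
      _ ≤ a := min_le_left _ _

theorem foldl_min_le_mem : ∀ (xs : List Int) (a y : Int), y ∈ xs → xs.foldl min a ≤ y := by
  intro xs
  induction xs with
  | nil => intro a y h; simp at h
  | cons x t ih =>
    intro a y h
    rcases List.mem_cons.mp h with rfl | h
    · calc t.foldl min (min a y) ≤ min a y := foldl_min_le_init _ _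
        _ ≤ y := min_le_right _ _
    · exact ih _ y h

theorem foldl_min_mem : ∀ (xs : List Int) (a : Int), xs.foldl min a = a ∨ xs.foldl min a ∈ xs := by
  intro xs
  induction xs with
  | nil => intro a; left; rfl
  | cons x t ih =>
    intro a
    rw [List.foldl_cons]
    rcases ih (min a x) with h | h
    · rcases min_cases a x with ⟨hv, _⟩ | ⟨hv, _⟩
      · left; rw [h, hv]
      · right; rw [h, hv]; exact List.mem_cons_self
    · right; exact List.mem_cons_of_mem _ h

theorem listMin_mem (x : Int) (xs : List Int) : listMin (x :: xs) ∈ x :: xs := by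
  show xs.foldl min x ∈ x :: xs
  rcases foldl_min_mem xs x with h | h
  · rw [h]; exact List.mem_cons_self
  · exact List.mem_cons_of_mem _ h

theorem listMin_le (x : Int) (xs : List Int) : ∀ y ∈ x :: xs, listMin (x :: xs) ≤ y := by
  intro y hy
  rcases List.mem_cons.mp hy with rfl | hy
  · exact foldl_min_le_init xs y
  · exact foldl_min_le_mem xs x y hy

theorem listMin_le_mem (l : List Int) (y : Int) (h : y ∈ l) : listMin l ≤ y := by
  cases l with
  | nil => simp at h
  | cons a as => exact listMin_le a as y h

theorem listMin_mem_of_ne_nil (l : List Int) (h : l ≠ []) : listMin l ∈ l := by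
  cases l with
  | nil => exact absurd rfl h
  | cons a as => exact listMin_mem a as

theorem fAll_eq_listMin (arr : List Int) (g : Int) (h : arr ≠ []) :
    fAll arr g = listMin (arr.map (fun x => (Int.gcd g x : Int))) := by
  cases arr with
  | nil => exact absurd rfl h
  | cons a as => simp [fAll, listMin, List.foldl_map]

-- ---- generic "first strict minimum" fold, tagged with positions ----
def fminT {t : Type} : List (Int × t) → (Int × t) → (Int × t)
  | [], bp => bp
  | q :: rest, bp => fminT rest (if q.1 < bp.1 then q else bp)

def fminO {t : Type} : List (Int × t) → Option (Int × t) → Option (Int × t)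
  | [], b => b
  | q :: rest, none => fminO rest (some q)
  | q :: rest, some bp => fminO rest (some (if q.1 < bp.1 then q else bp))

theorem fminO_some {t : Type} : ∀ (l : List (Int × t)) (bp : Int × t),
    fminO l (some bp) = some (fminT l bp) := by
  intro l
  induction l with
  | nil => intro bp; rfl
  | cons q rest ih => intro bp; simp only [fminO, fminT]; exact ih _

theorem fminT_map_tag {t s : Type} (f : t → s) : ∀ (l : List (Int × t)) (bp : Int × t),
    fminT (l.map (fun q => (q.1, f q.2))) (bp.1, f bp.2)
      = ((fminT l bp).1, f (fminT l bp).2) := by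
  intro l
  induction l with
  | nil => intro bp; rfl
  | cons q rest ih =>
    intro bp
    simp only [List.map_cons, fminT]
    by_cases h : q.1 < bp.1 <;> simp only [h, if_pos, if_false] <;>
      first
        | exact ih q
        | exact ih bp

theorem fminT_fst {t : Type} : ∀ (l : List (Int × t)) (bp : Int × t),
    (fminT l bp).1 = (l.map Prod.fst).foldl min bp.1 := by
  intro l
  induction l with
  | nil => intro bp; rfl
  | cons q rest ih =>
    intro bp
    simp only [fminT, List.map_cons, List.foldl_cons]
    rw [ih]
    congr 1
    by_cases h : q.1 < bp.1 <;> simp [h, min_def] <;> omega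

theorem fminT_mem {t : Type} : ∀ (l : List (Int × t)) (bp : Int × t),
    fminT l bp = bp ∨ fminT l bp ∈ l := by
  intro l
  induction l with
  | nil => intro bp; left; rfl
  | cons q rest ih =>
    intro bp
    simp only [fminT]
    rcases ih (if q.1 < bp.1 then q else bp) with h | h
    · by_cases hlt : q.1 < bp.1
      · right; rw [h, if_pos hlt]; exact List.mem_cons_self
      · left; rw [h, if_neg hlt]
    · right; exact List.mem_cons_of_mem _ h

def tagFrom : Nat → List Int → List (Int × Nat)
  | _, [] => []
  | i, v :: vs => (v, i) :: tagFrom (i + 1) vs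

theorem map_fst_tagFrom : ∀ (vs : List Int) (i : Nat), (tagFrom i vs).map Prod.fst = vs := by
  intro vs
  induction vs with
  | nil => intro i; rfl
  | cons v t ih => intro i; simp [tagFrom, ih]

theorem mem_tagFrom {q : Int × Nat} : ∀ (vs : List Int) (i : Nat), q ∈ tagFrom i vs →
    ∃ j, j < vs.length ∧ q.2 = i + j ∧ vs.getD j 0 = q.1 := by
  intro vs
  induction vs with
  | nil => intro i h; simp [tagFrom] at h
  | cons v t ih =>
    intro i h
    rcases List.mem_cons.mp h with rfl | h
    · exact ⟨0, by simp, by simp, rfl⟩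
    · rcases ih (i + 1) h with ⟨j, hj, hq, hv⟩
      exact ⟨j + 1, by simpa using hj, by omega, by simpa using hv⟩

-- the chosen (value, position-within-remaining) of one of A's inner scans
def chooseMin (g r : Int) (rs : List Int) : Int × Nat :=
  fminT (tagFrom 1 (rs.map (fun x => (Int.gcd g x : Int)))) ((Int.gcd g r : Int), 0)

theorem chooseMin_val (g r : Int) (rs : List Int) :
    (chooseMin g r rs).1 = listMin ((r :: rs).map (fun x => (Int.gcd g x : Int))) := by
  unfold chooseMin
  rw [fminT_fst, map_fst_tagFrom]
  simp [listMin, List.foldl_map]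

theorem chooseMin_spec (g r : Int) (rs : List Int) :
    (chooseMin g r rs).2 < rs.length + 1 ∧
      (Int.gcd g ((r :: rs).getD (chooseMin g r rs).2 0) : Int) = (chooseMin g r rs).1 := by
  unfold chooseMin
  rcases fminT_mem (tagFrom 1 (rs.map (fun x => (Int.gcd g x : Int)))) ((Int.gcd g r : Int), 0)
    with h | h
  · rw [h]; exact ⟨by omega, rfl⟩
  · rcases mem_tagFrom _ _ h with ⟨j, hj, hq, hv⟩
    simp only [List.length_map] at hj
    refine ⟨by omega, ?_⟩
    rw [hq, show 1 + j = j + 1 by omega, List.getD_cons_succ]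
    rw [List.getD_eq_getElem _ _ (by simpa using hj), List.getElem_map] at hv
    rw [List.getD_eq_getElem _ _ hj]
    exact hv

-- ---- A-side abstractions over zs = arr.zip used ----
def remZ : List (Int × Bool) → List Int
  | [] => []
  | q :: rest => if q.2 then remZ rest else q.1 :: remZ rest

def posN : Nat → List (Int × Bool) → List Nat
  | _, [] => []
  | i, q :: rest => if q.2 then posN (i + 1) rest else i :: posN (i + 1) rest

theorem tagFrom_add : ∀ (vs : List Int) (i k : Nat),
    tagFrom (i + k) vs = (tagFrom i vs).map (fun q => (q.1, q.2 + k)) := by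
  intro vs
  induction vs with
  | nil => intro i k; rfl
  | cons v t ih =>
    intro i k
    simp only [tagFrom, List.map_cons]
    exact congrArg _ (by rw [show i + k + 1 = (i + 1) + k by omega]; exact ih (i+1) k)

def upP (g : Int) : Int → List (Int × Bool) → List (Int × Int)
  | _, [] => []
  | i, q :: rest =>
    if q.2 then upP g (i + 1) rest
    else ((Int.gcd g q.1 : Int), i) :: upP g (i + 1) rest

theorem length_posN : ∀ (zs : List (Int × Bool)) (i : Nat),
    (posN i zs).length = (remZ zs).length := by
  intro zs
  induction zs with
  | nil => intro i; rfl
  | cons q rest ih =>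
    intro i
    by_cases h : q.2 <;> simp [posN, remZ, h, ih]

theorem posN_add : ∀ (zs : List (Int × Bool)) (i k : Nat),
    posN (i + k) zs = (posN i zs).map (· + k) := by
  intro zs
  induction zs with
  | nil => intro i k; rfl
  | cons q rest ih =>
    intro i k
    by_cases h : q.2 <;>
      simp [posN, h, show i + k + 1 = (i + 1) + k by omega, ih (i+1) k]

theorem upP_decomp (g : Int) : ∀ (zs : List (Int × Bool)) (i : Nat),
    upP g (i : Int) zs
      = (tagFrom 0 ((remZ zs).map (fun x => (Int.gcd g x : Int)))).map
          (fun q => (q.1, (((posN i zs).getD q.2 0 : Nat) : Int))) := by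
  intro zs
  induction zs with
  | nil => intro i; rfl
  | cons q rest ih =>
    intro i
    rcases q with ⟨x, u⟩
    cases u
    · simp only [upP, posN, remZ, Bool.false_eq_true, if_false, List.map_cons, tagFrom,
        List.getD_cons_zero]
      rw [show (i : Int) + 1 = ((i + 1 : Nat) : Int) by push_cast; ring, ih (i + 1),
          show (1 : Nat) = 0 + 1 from rfl, tagFrom_add, List.map_map]
      simp only [List.cons.injEq]
      refine ⟨by simp, List.map_congr_left (fun p hp => by simp)⟩
    · simp only [upP, posN, remZ, if_true]
      rw [show (i : Int) + 1 = ((i + 1 : Nat) : Int) by push_cast; ring]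
      exact ih (i + 1)

theorem getD_map_add_one : ∀ (l : List Nat) (p : Nat), p < l.length →
    (l.map (· + 1)).getD p 0 = l.getD p 0 + 1 := by
  intro l p hp
  rw [List.getD_eq_getElem?_getD, List.getD_eq_getElem?_getD, List.getElem?_map,
      List.getElem?_eq_getElem hp]
  rfl

theorem remZ_zip_set : ∀ (arr : List Int) (used : List Bool) (p : Nat),
    used.length = arr.length → p < (posN 0 (arr.zip used)).length →
    remZ (arr.zip (used.set ((posN 0 (arr.zip used)).getD p 0) true))
      = (remZ (arr.zip used)).eraseIdx p := by
  intro arr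
  induction arr with
  | nil => intro used p _ hp; simp [posN] at hp
  | cons x xs ih =>
    intro used p hlen hp
    cases used with
    | nil => simp at hlen
    | cons u us =>
      have hlen' : us.length = xs.length := by simpa using hlen
      cases u
      · have hpos : posN 0 ((x :: xs).zip (false :: us))
            = 0 :: (posN 0 (xs.zip us)).map (· + 1) := by
          simp [List.zip_cons_cons, posN, posN_add (xs.zip us) 0 1]
        cases p with
        | zero =>
          rw [hpos]
          simp [List.zip_cons_cons, remZ]
        | succ p =>
          have hp' : p < (posN 0 (xs.zip us)).length := by
            rw [hpos] at hp; simpa using hp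
          have hgd : (posN 0 ((x :: xs).zip (false :: us))).getD (p + 1) 0
              = (posN 0 (xs.zip us)).getD p 0 + 1 := by
            rw [hpos]
            simpa using getD_map_add_one _ p hp'
          rw [hgd]
          simp only [List.zip_cons_cons, List.set_cons_succ, remZ, Bool.false_eq_true, if_false]
          rw [List.eraseIdx_cons_succ]
          exact congrArg _ (ih us p hlen' hp')
      · have hpos : posN 0 ((x :: xs).zip (true :: us))
            = (posN 0 (xs.zip us)).map (· + 1) := by
          simp [List.zip_cons_cons, posN, posN_add (xs.zip us) 0 1]
        have hp' : p < (posN 0 (xs.zip us)).length := by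
          rw [hpos] at hp; simpa using hp
        have hgd : (posN 0 ((x :: xs).zip (true :: us))).getD p 0
            = (posN 0 (xs.zip us)).getD p 0 + 1 := by
          rw [hpos]; exact getD_map_add_one _ p hp'
        rw [hgd]
        simp only [List.zip_cons_cons, List.set_cons_succ, remZ]
        exact ih us p hlen' hp'

def ebody (g : Int) (best : Option (Int × Int)) (ju : Int × (Int × Bool)) : Option (Int × Int) :=
  if ju.2.2 = false then
    match best with
    | none => some ((Int.gcd g ju.2.1 : Int), ju.1)
    | some bp =>
      if (Int.gcd g ju.2.1 : Int) < bp.1 then some ((Int.gcd g ju.2.1 : Int), ju.1)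
      else best
  else best

theorem enum_fold (g : Int) : ∀ (zs : List (Int × Bool)) (s : Int) (b : Option (Int × Int)),
    (PySem.List.enumerate zs s).foldl (ebody g) b = fminO (upP g s zs) b := by
  intro zs
  induction zs with
  | nil => intro s b; simp [PySem.List.enumerate_nil, upP, fminO]
  | cons q rest ih =>
    intro s b
    rcases q with ⟨x, u⟩
    rw [PySem.List.enumerate_cons, List.foldl_cons]
    cases u
    · cases b with
      | none =>
        simp only [upP, Bool.false_eq_true, if_false, fminO]
        rw [← ih (s + 1) (some ((Int.gcd g x : Int), s))]
        rfl
      | some bp =>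
        simp only [upP, Bool.false_eq_true, if_false, fminO]
        rw [← ih (s + 1)]
        congr 1
        by_cases hlt : (Int.gcd g x : Int) < bp.1 <;> simp [ebody, hlt]
    · simp only [upP, if_true]
      rw [← ih (s + 1) b]
      rfl

theorem aScan_eq (arr : List Int) (g : Int) (used : List Bool)
    (h : used.length = arr.length) :
    aScan arr g used = fminO (upP g 0 (arr.zip used)) none := by
  have hz : (arr.zip used).length = arr.length := by simp [List.length_zip, h]
  unfold aScan
  rw [show PySem.List.len arr = PySem.List.len (arr.zip used) by simp [hz]]
  rw [PySem.List.foldl_congr_mem (g :=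
    (fun best (j : Int) =>
      ebody g best (j, PySem.List.pyGetD (arr.zip used) j ((0 : Int), true))))
    (h := ?_)]
  · rw [← List.foldl_map, ← PySem.List.enumerate_eq_map_pyRange (arr.zip used) ((0 : Int), true)]
    exact enum_fold g (arr.zip used) 0 none
  · intro acc j hj
    rcases (PySem.List.mem_pyRange_one).mp hj with ⟨hj0, hj1⟩
    have hjz : j < (((arr.zip used).length : Nat) : Int) := by simpa using hj1
    have hca : (((arr.zip used).length : Nat) : Int) = ((arr.length : Nat) : Int) := by
      exact_mod_cast hz
    have hcu : ((used.length : Nat) : Int) = ((arr.length : Nat) : Int) := by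
      exact_mod_cast h
    have h1 : PySem.List.pyGetD (arr.zip used) j ((0 : Int), true)
        = (arr[j.toNat]'(by omega), used[j.toNat]'(by omega)) := by
      rw [PySem.List.pyGetD_eq_getElem _ _ hj0 (by simpa using hjz)]
      exact List.getElem_zip
    have h2 : PySem.List.pyGetD used j true = used[j.toNat]'(by omega) :=
      PySem.List.pyGetD_eq_getElem _ _ hj0
        (by simpa using (show j < ((used.length : Nat) : Int) by omega))
    have h3 : PySem.List.pyGetD arr j 0 = arr[j.toNat]'(by omega) :=
      PySem.List.pyGetD_eq_getElem _ _ hj0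
        (by simpa using (show j < ((arr.length : Nat) : Int) by omega))
    simp only [h2, h3, ebody, h1]

theorem step_analysis (arr : List Int) (used : List Bool) (g : Int) (r : Int) (rs : List Int)
    (hlen : used.length = arr.length) (hrem : remZ (arr.zip used) = r :: rs) :
    aScan arr g used
      = some ((chooseMin g r rs).1,
          (((posN 0 (arr.zip used)).getD (chooseMin g r rs).2 0 : Nat) : Int)) := by
  rw [aScan_eq arr g used hlen,
      show (0 : Int) = ((0 : Nat) : Int) by simp,
      upP_decomp g (arr.zip used) 0, hrem]
  simp only [List.map_cons, tagFrom, fminO]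
  rw [fminO_some]
  exact congrArg some
    (fminT_map_tag (fun p => (((posN 0 (arr.zip used)).getD p 0 : Nat) : Int))
      (tagFrom 1 (rs.map (fun x => (Int.gcd g x : Int)))) ((Int.gcd g r : Int), 0))

-- ---- positions/remaining bookkeeping ----
theorem getD_mem (l : List Int) (p : Nat) (h : p < l.length) : l.getD p 0 ∈ l := by
  rw [List.getD_eq_getElem _ _ h]; exact List.getElem_mem h

theorem getD_set_ne (l : List Bool) (i j : Nat) (v : Bool) (h : j ≠ i) :
    (l.set i v).getD j false = l.getD j false := by
  simp [List.getD_eq_getElem?_getD, List.getElem?_set_ne (by omega : i ≠ j)]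

theorem getD_set_self (l : List Bool) (j : Nat) (v : Bool) (h : j < l.length) :
    (l.set j v).getD j false = v := by
  simp [List.getD_eq_getElem?_getD, h]

theorem remZ_subset : ∀ (arr : List Int) (used : List Bool) (x : Int),
    x ∈ remZ (arr.zip used) → x ∈ arr := by
  intro arr
  induction arr with
  | nil => intro used x h; simp [List.zip] at h; simp [remZ] at h
  | cons a as ih =>
    intro used x h
    cases used with
    | nil => simp [remZ] at h
    | cons u us =>
      rw [List.zip_cons_cons] at h
      cases u
      · simp only [remZ, Bool.false_eq_true, if_false] at h
        rcases List.mem_cons.mp h with rfl | h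
        · exact List.mem_cons_self
        · exact List.mem_cons_of_mem _ (ih us x h)
      · simp only [remZ, if_true] at h
        exact List.mem_cons_of_mem _ (ih us x h)

theorem mem_remZ_of_not_used : ∀ (arr : List Int) (used : List Bool) (i : Nat),
    used.length = arr.length → i < arr.length → used.getD i false = false →
    arr.getD i 0 ∈ remZ (arr.zip used) := by
  intro arr
  induction arr with
  | nil => intro used i _ hi; simp at hi
  | cons a as ih =>
    intro used i hlen hi hu
    cases used with
    | nil => simp at hlen
    | cons u us =>
      rw [List.zip_cons_cons]
      cases i with
      | zero =>
        simp only [List.getD_cons_zero] at hu ⊢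
        subst hu
        simp [remZ]
      | succ i =>
        simp only [List.getD_cons_succ] at hu ⊢
        have := ih us i (by simpa using hlen) (by simpa using hi) hu
        cases u
        · simpa [remZ] using List.mem_cons_of_mem _ this
        · simpa [remZ] using this

theorem posN_spec : ∀ (arr : List Int) (used : List Bool) (p : Nat),
    used.length = arr.length → p < (posN 0 (arr.zip used)).length →
    (posN 0 (arr.zip used)).getD p 0 < arr.length ∧
    arr.getD ((posN 0 (arr.zip used)).getD p 0) 0 = (remZ (arr.zip used)).getD p 0 ∧
    used.getD ((posN 0 (arr.zip used)).getD p 0) false = false := by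
  intro arr
  induction arr with
  | nil => intro used p _ hp; simp [posN] at hp
  | cons x xs ih =>
    intro used p hlen hp
    cases used with
    | nil => simp at hlen
    | cons u us =>
      have hlen' : us.length = xs.length := by simpa using hlen
      cases u
      · have hpos : posN 0 ((x :: xs).zip (false :: us))
            = 0 :: (posN 0 (xs.zip us)).map (· + 1) := by
          simp [List.zip_cons_cons, posN, posN_add (xs.zip us) 0 1]
        cases p with
        | zero =>
          rw [hpos]
          simp [List.zip_cons_cons, remZ]
        | succ p =>
          have hp' : p < (posN 0 (xs.zip us)).length := by
            rw [hpos] at hp; simpa using hp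
          have hgd : (posN 0 ((x :: xs).zip (false :: us))).getD (p + 1) 0
              = (posN 0 (xs.zip us)).getD p 0 + 1 := by
            rw [hpos]; simpa using getD_map_add_one _ p hp'
          rcases ih us p hlen' hp' with ⟨h1, h2, h3⟩
          rw [hgd]
          refine ⟨by simpa using h1, ?_, by simpa using h3⟩
          simp only [List.getD_cons_succ, List.zip_cons_cons, remZ, Bool.false_eq_true, if_false]
          simpa using h2
      · have hpos : posN 0 ((x :: xs).zip (true :: us))
            = (posN 0 (xs.zip us)).map (· + 1) := by
          simp [List.zip_cons_cons, posN, posN_add (xs.zip us) 0 1]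
        have hp' : p < (posN 0 (xs.zip us)).length := by
          rw [hpos] at hp; simpa using hp
        have hgd : (posN 0 ((x :: xs).zip (true :: us))).getD p 0
            = (posN 0 (xs.zip us)).getD p 0 + 1 := by
          rw [hpos]; exact getD_map_add_one _ p hp'
        rcases ih us p hlen' hp' with ⟨h1, h2, h3⟩
        rw [hgd]
        refine ⟨by simpa using h1, ?_, by simpa using h3⟩
        simp only [List.getD_cons_succ, List.zip_cons_cons, remZ, if_true]
        exact h2

-- ---- the outer loop as function iteration ----
def iterN {s : Type} (h : s → s) : Nat → s → s
  | 0, st => st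
  | k + 1, st => iterN h k (h st)

theorem foldl_const {a s : Type} (h : s → s) : ∀ (l : List a) (st : s),
    l.foldl (fun st _ => h st) st = iterN h l.length st := by
  intro l
  induction l with
  | nil => intro st; rfl
  | cons x t ih => intro st; simp [List.foldl_cons, iterN, ih]

theorem fminT_const {t : Type} : ∀ (l : List (Int × t)) (bp : Int × t),
    (∀ q ∈ l, ¬ q.1 < bp.1) → fminT l bp = bp := by
  intro l
  induction l with
  | nil => intro bp _; rfl
  | cons q rest ih =>
    intro bp h
    simp only [fminT, if_neg (h q (List.mem_cons_self))]
    exact ih bp (fun p hp => h p (List.mem_cons_of_mem _ hp))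

theorem mem_tagFrom_val : ∀ (vs : List Int) (i : Nat) (q : Int × Nat),
    q ∈ tagFrom i vs → q.1 ∈ vs := by
  intro vs
  induction vs with
  | nil => intro i q h; simp [tagFrom] at h
  | cons v t ih =>
    intro i q h
    rcases List.mem_cons.mp h with rfl | h
    · simp
    · exact List.mem_cons_of_mem _ (ih _ _ h)

theorem plateau (arr : List Int) : ∀ (m : Nat) (used : List Bool) (g tot : Int),
    used.length = arr.length → (remZ (arr.zip used)).length = m → 0 < g →
    (∀ x ∈ remZ (arr.zip used), (Int.gcd g x : Int) = g) →
    (iterN (aStep arr) m (used, g, tot)).2.2 = tot + g * m := by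
  intro m
  induction m with
  | zero => intro used g tot _ _ _ _; simp [iterN]
  | succ m ih =>
    intro used g tot hlen hk hg hconst
    cases hrem : remZ (arr.zip used) with
    | nil => rw [hrem] at hk; simp at hk
    | cons r rs =>
      have hsa := step_analysis arr used g r rs hlen hrem
      have hBc : chooseMin g r rs = ((Int.gcd g r : Int), 0) := by
        unfold chooseMin
        refine fminT_const _ _ (fun q hq => ?_)
        rcases List.mem_map.mp (mem_tagFrom_val _ _ _ hq) with ⟨x, hx, hqv⟩
        rw [← hqv, hconst x (by rw [hrem]; exact List.mem_cons_of_mem _ hx),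
            hconst r (by rw [hrem]; exact List.mem_cons_self)]
        omega
      have hgr : (Int.gcd g r : Int) = g := hconst r (by rw [hrem]; exact List.mem_cons_self)
      rw [hBc] at hsa
      have hpl : 0 < (posN 0 (arr.zip used)).length := by
        rw [length_posN, hrem]; simp
      have hset := remZ_zip_set arr used 0 hlen hpl
      rw [hrem, List.eraseIdx_zero, List.tail_cons] at hset
      have hstep : aStep arr (used, g, tot)
          = (used.set ((posN 0 (arr.zip used)).getD 0 0) true, g, tot + g) := by
        simp only [aStep, hsa, hgr, PySem.List.pySetD_natCast]
      have hlen' : (used.set ((posN 0 (arr.zip used)).getD 0 0) true).length = arr.length := by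
        simpa using hlen
      have hk' : (remZ (arr.zip (used.set ((posN 0 (arr.zip used)).getD 0 0) true))).length = m := by
        rw [hset]
        have : (remZ (arr.zip used)).length = m + 1 := hk
        rw [hrem] at this; simpa using this
      have hconst' : ∀ x ∈ remZ (arr.zip (used.set ((posN 0 (arr.zip used)).getD 0 0) true)),
          (Int.gcd g x : Int) = g := by
        intro x hx
        rw [hset] at hx
        exact hconst x (by rw [hrem]; exact List.mem_cons_of_mem _ hx)
      show (iterN (aStep arr) m (aStep arr (used, g, tot))).2.2 = tot + g * (m + 1 : Nat)
      rw [hstep, ih _ g (tot + g) hlen' hk' hg hconst']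
      push_cast
      ring


-- ---- the main invariant loop: A's greedy equals B's whole-array fixpoint iteration ----
theorem main_loop (arr : List Int) : ∀ (k : Nat) (used : List Bool) (g tot : Int),
    used.length = arr.length →
    (remZ (arr.zip used)).length = k →
    g ≠ 0 →
    (∀ i : Nat, used.getD i false = true → (Int.gcd g (arr.getD i 0) : Int) = |g|) →
    (iterN (aStep arr) k (used, g, tot)).2.2 = bLoop arr g tot k := by
  intro k
  induction k with
  | zero => intro used g tot _ _ _ _; simp [iterN, bLoop]
  | succ k ih =>
    intro used g tot hlen hk hg hinv
    cases hrem : remZ (arr.zip used) with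
    | nil => rw [hrem] at hk; simp at hk
    | cons r rs =>
      have hrs : rs.length = k := by rw [hrem] at hk; simpa using hk
      have hane : arr ≠ [] := by
        intro h; subst h; simp [remZ] at hrem
      have hsa := step_analysis arr used g r rs hlen hrem
      rcases chooseMin_spec g r rs with ⟨hq2, hqv⟩
      set q := chooseMin g r rs with hqdef
      set y := (r :: rs).getD q.2 0 with hydef
      have hymem : y ∈ r :: rs := getD_mem _ _ (by simpa [hrs] using hq2)
      have hsub : ∀ x ∈ r :: rs, x ∈ arr := by
        intro x hx; exact remZ_subset arr used x (hrem ▸ hx)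
      have hq1v : q.1 = listMin ((r :: rs).map (fun x => (Int.gcd g x : Int))) :=
        chooseMin_val g r rs
      have hq1le : ∀ x ∈ r :: rs, q.1 ≤ (Int.gcd g x : Int) := by
        intro x hx
        rw [hq1v]
        exact listMin_le_mem _ _ (List.mem_map_of_mem hx)
      have hq1nonneg : 0 ≤ q.1 := by rw [← hqv]; positivity
      have hfa : fAll arr g = q.1 := by
        have hle1 : fAll arr g ≤ q.1 := by
          rw [fAll_eq_listMin arr g hane, ← hqv]
          exact listMin_le_mem _ _ (List.mem_map_of_mem (hsub y hymem))
        have hle2 : q.1 ≤ fAll arr g := by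
          have hmem : fAll arr g ∈ arr.map (fun x => (Int.gcd g x : Int)) := by
            rw [fAll_eq_listMin arr g hane]
            exact listMin_mem_of_ne_nil _ (by simpa using hane)
          rcases List.mem_map.mp hmem with ⟨x0, hx0, hxv⟩
          rcases List.mem_iff_getElem.mp hx0 with ⟨i, hi, hgi⟩
          cases husi : used.getD i false with
          | true =>
            have hin := hinv i husi
            rw [List.getD_eq_getElem _ _ hi, hgi] at hin
            have hyb : q.1 ≤ |g| := by
              rw [← hqv]; exact gcd_le_abs g y hg
            rw [← hxv, hin]; exact hyb
          | false =>
            have hx0rem : x0 ∈ r :: rs := by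
              have hmm := mem_remZ_of_not_used arr used i hlen hi husi
              rw [List.getD_eq_getElem _ _ hi, hgi, hrem] at hmm
              exact hmm
            rw [← hxv]; exact hq1le x0 hx0rem
        omega
      by_cases hd : q.1 = g
      · -- plateau: every remaining gcd equals g, bulk-add
        have hgpos : 0 < g := by
          rcases lt_or_eq_of_le hq1nonneg with h | h
          · omega
          · rw [← h] at hd; omega
        have hconst : ∀ x ∈ remZ (arr.zip used), (Int.gcd g x : Int) = g := by
          intro x hx
          rw [hrem] at hx
          have h1 : (Int.gcd g x : Int) ≤ |g| := gcd_le_abs g x hg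
          have h2 : g ≤ (Int.gcd g x : Int) := hd ▸ hq1le x hx
          rw [abs_of_pos hgpos] at h1
          omega
        rw [plateau arr (k + 1) used g tot hlen hk hgpos hconst]
        simp [bLoop, hfa, hd]
      · -- strict step: one element accounted, recurse with the new gcd
        set idx := (posN 0 (arr.zip used)).getD q.2 0 with hidxdef
        have hplen : q.2 < (posN 0 (arr.zip used)).length := by
          rw [length_posN, hrem]; simpa [hrs] using hq2
        rcases posN_spec arr used q.2 hlen hplen with ⟨hidlt, hidval, hidun⟩
        rw [hrem] at hidval
        have hstep : aStep arr (used, g, tot)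
            = (used.set idx true, q.1, tot + q.1) := by
          simp only [aStep, hsa, PySem.List.pySetD_natCast]
        have hdy : q.1 = (Int.gcd g y : Int) := hqv.symm
        have hdnz : q.1 ≠ 0 := by rw [hdy]; exact gcd_cast_ne_zero g y hg
        have hdabs : |q.1| = q.1 := abs_of_nonneg hq1nonneg
        have hinv' : ∀ i : Nat, (used.set idx true).getD i false = true →
            (Int.gcd q.1 (arr.getD i 0) : Int) = |q.1| := by
          intro i hui
          by_cases hii : i = idx
          · subst hii
            rw [hidval]
            have hdvd : q.1 ∣ y := hdy ▸ gcd_cast_dvd_right g y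
            exact gcd_eq_abs_of_dvd q.1 y hdvd
          · rw [getD_set_ne used idx i true hii] at hui
            have hgabs := hinv i hui
            have h1 : (Int.gcd g (arr.getD i 0) : Int) ∣ arr.getD i 0 :=
              gcd_cast_dvd_right g _
            rw [hgabs] at h1
            have h2 : q.1 ∣ g := hdy ▸ gcd_cast_dvd_left g y
            have h3 : q.1 ∣ arr.getD i 0 := dvd_trans ((dvd_abs _ _).mpr h2) h1
            exact gcd_eq_abs_of_dvd q.1 _ h3
        have hlen' : (used.set idx true).length = arr.length := by simpa using hlen
        have hk' : (remZ (arr.zip (used.set idx true))).length = k := by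
          rw [hidxdef, remZ_zip_set arr used q.2 hlen hplen, hrem, List.length_eraseIdx]
          rw [if_pos (by simpa [hrs] using hq2)]
          simp [hrs]
        show (iterN (aStep arr) k (aStep arr (used, g, tot))).2.2 = _
        rw [hstep, ih _ q.1 (tot + q.1) hlen' hk' hdnz hinv']
        simp only [bLoop, hfa, if_neg hd]

-- ---- zero handling ----
theorem count_eraseIdx_zero : ∀ (l : List Int) (p : Nat), p < l.length → l.getD p 0 = 0 →
    (l.eraseIdx p).count 0 + 1 = l.count 0 := by
  intro l
  induction l with
  | nil => intro p hp; simp at hp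
  | cons x t ih =>
    intro p hp h0
    cases p with
    | zero =>
      simp only [List.getD_cons_zero] at h0
      subst h0
      simp [List.eraseIdx_zero]
    | succ p =>
      rw [List.eraseIdx_cons_succ, List.count_cons, List.count_cons]
      have := ih p (by simpa using hp) (by simpa using h0)
      omega

theorem remZ_eq_filter : ∀ (arr : List Int) (used : List Bool),
    used.length = arr.length →
    (∀ i : Nat, i < arr.length → used.getD i false = decide (arr.getD i 0 = 0)) →
    remZ (arr.zip used) = arr.filter (fun x => decide (x ≠ 0)) := by
  intro arr
  induction arr with
  | nil => intro used _ _; simp [remZ]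
  | cons a as ih =>
    intro used hlen hchar
    cases used with
    | nil => simp at hlen
    | cons u us =>
      have h0 := hchar 0 (by simp)
      simp only [List.getD_cons_zero] at h0
      have htail : remZ (as.zip us) = as.filter (fun x => decide (x ≠ 0)) :=
        ih us (by simpa using hlen)
          (fun i hi => by simpa using hchar (i + 1) (by simpa using hi))
      rw [List.zip_cons_cons]
      by_cases ha : a = 0
      · have : u = true := by rw [h0]; simpa using ha
        subst this
        simp [remZ, ha, htail]
      · have : u = false := by rw [h0]; simpa using ha
        subst this
        simp [remZ, ha, htail]

theorem map_gcd_zero_id (l : List Int) (h : ∀ x ∈ l, 0 ≤ x) :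
    l.map (fun x => (Int.gcd 0 x : Int)) = l := by
  rw [List.map_congr_left (fun x hx => gcd_zero_of_nonneg x (h x hx))]
  exact List.map_id _

-- the g = 0 phase: A consumes the remaining zeros one by one, then behaves as the
-- invariant loop started at the smallest nonzero element
theorem zero_loop (arr : List Int) (hnn : ∀ x ∈ arr, 0 ≤ x) : ∀ (c k : Nat)
    (used : List Bool) (tot : Int),
    used.length = arr.length →
    (remZ (arr.zip used)).length = k →
    (remZ (arr.zip used)).count 0 = c →
    (∀ i : Nat, used.getD i false = true → arr.getD i 0 = 0) →
    (iterN (aStep arr) k (used, 0, tot)).2.2 =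
      if c = k then tot
      else bLoop arr (listMin (arr.filter (fun x => decide (x ≠ 0))))
        (tot + listMin (arr.filter (fun x => decide (x ≠ 0)))) (k - c - 1) := by
  intro c
  induction c with
  | zero =>
    intro k used tot hlen hk hc hinv
    cases k with
    | zero =>
      have : remZ (arr.zip used) = [] := List.length_eq_zero_iff.mp hk
      simp [iterN]
    | succ k =>
      rw [if_neg (by omega)]
      cases hrem : remZ (arr.zip used) with
      | nil => rw [hrem] at hk; simp at hk
      | cons r rs =>
        have hrs : rs.length = k := by rw [hrem] at hk; simpa using hk
        -- the remaining elements are exactly the nonzeros of arr, in order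
        have hchar : ∀ i : Nat, i < arr.length → used.getD i false = decide (arr.getD i 0 = 0) := by
          intro i hi
          cases husi : used.getD i false with
          | true => rw [hinv i husi]; simp
          | false =>
            have hmem := mem_remZ_of_not_used arr used i hlen hi husi
            by_cases hz : arr.getD i 0 = 0
            · exfalso
              rw [hz, hrem] at hmem
              rw [hrem] at hc
              have := List.count_pos_iff.mpr hmem
              omega
            · exact (decide_eq_false hz).symm
        have hfilt : remZ (arr.zip used) = arr.filter (fun x => decide (x ≠ 0)) :=
          remZ_eq_filter arr used hlen hchar
        have hsub : ∀ x ∈ r :: rs, x ∈ arr := by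
          intro x hx; exact remZ_subset arr used x (hrem ▸ hx)
        have hrnn : ∀ x ∈ r :: rs, 0 ≤ x := fun x hx => hnn x (hsub x hx)
        have hrnz : ∀ x ∈ r :: rs, x ≠ 0 := by
          intro x hx hx0
          subst hx0
          rw [hrem] at hc
          have := List.count_pos_iff.mpr hx
          omega
        -- the chosen value is the minimum of the nonzeros
        have hfiltrs : arr.filter (fun x => decide (x ≠ 0)) = r :: rs := by
          rw [← hfilt, hrem]
        set p := listMin (arr.filter (fun x => decide (x ≠ 0))) with hpdef
        have hmapid : (r :: rs).map (fun x => (Int.gcd 0 x : Int)) = r :: rs :=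
          map_gcd_zero_id _ hrnn
        have hsa := step_analysis arr used 0 r rs hlen hrem
        rcases chooseMin_spec 0 r rs with ⟨hq2, hqv⟩
        set q := chooseMin 0 r rs with hqdef
        have hq1v : q.1 = p := by
          rw [hqdef, chooseMin_val 0 r rs, hmapid, hpdef, hfiltrs]
        set y := (r :: rs).getD q.2 0 with hydef
        have hymem : y ∈ r :: rs := getD_mem _ _ (by simpa [hrs] using hq2)
        have hyval : y = q.1 := by
          have := hqv
          rw [gcd_zero_of_nonneg y (hrnn y hymem)] at this
          exact this
        have hpmem : p ∈ r :: rs := by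
          rw [hpdef, hfiltrs]
          exact listMin_mem r rs
        have hpnz : p ≠ 0 := hrnz p hpmem
        set idx := (posN 0 (arr.zip used)).getD q.2 0 with hidxdef
        have hplen : q.2 < (posN 0 (arr.zip used)).length := by
          rw [length_posN, hrem]; simpa [hrs] using hq2
        rcases posN_spec arr used q.2 hlen hplen with ⟨hidlt, hidval, hidun⟩
        rw [hrem] at hidval
        have hstep : aStep arr (used, 0, tot) = (used.set idx true, q.1, tot + q.1) := by
          simp only [aStep, hsa, PySem.List.pySetD_natCast]
        have hppos : 0 < p := by
          have := hrnn p hpmem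
          omega
        have hinv' : ∀ i : Nat, (used.set idx true).getD i false = true →
            (Int.gcd p (arr.getD i 0) : Int) = |p| := by
          intro i hui
          by_cases hii : i = idx
          · subst hii
            rw [hidval, ← hydef, hyval, hq1v]
            exact gcd_eq_abs_of_dvd p p dvd_rfl
          · rw [getD_set_ne used idx i true hii] at hui
            rw [hinv i hui]
            rw [gcd_eq_abs_of_dvd p 0 (dvd_zero p)]
        have hlen' : (used.set idx true).length = arr.length := by simpa using hlen
        have hk' : (remZ (arr.zip (used.set idx true))).length = k := by
          rw [hidxdef, remZ_zip_set arr used q.2 hlen hplen, hrem, List.length_eraseIdx]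
          rw [if_pos (by simpa [hrs] using hq2)]
          simp [hrs]
        show (iterN (aStep arr) k (aStep arr (used, 0, tot))).2.2 = _
        rw [hstep, hq1v, main_loop arr k _ p (tot + p) hlen' hk' (by omega) hinv']
        congr 1
  | succ c ih =>
    intro k used tot hlen hk hc hinv
    cases hrem : remZ (arr.zip used) with
    | nil => rw [hrem] at hc; simp at hc
    | cons r rs =>
      have hk1 : k = rs.length + 1 := by rw [hrem] at hk; simp at hk; omega
      have hrs : rs.length = k - 1 := by omega
      have hsub : ∀ x ∈ r :: rs, x ∈ arr := by
        intro x hx; exact remZ_subset arr used x (hrem ▸ hx)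
      have hrnn : ∀ x ∈ r :: rs, 0 ≤ x := fun x hx => hnn x (hsub x hx)
      have hz : (0 : Int) ∈ r :: rs := by
        rw [hrem] at hc
        exact List.count_pos_iff.mp (by omega)
      have hmapid : (r :: rs).map (fun x => (Int.gcd 0 x : Int)) = r :: rs :=
        map_gcd_zero_id _ hrnn
      have hsa := step_analysis arr used 0 r rs hlen hrem
      rcases chooseMin_spec 0 r rs with ⟨hq2, hqv⟩
      set q := chooseMin 0 r rs with hqdef
      have hq1v : q.1 = listMin (r :: rs) := by
        rw [chooseMin_val 0 r rs, hmapid]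
      have hq10 : q.1 = 0 := by
        have hle : listMin (r :: rs) ≤ 0 := listMin_le r rs 0 hz
        have hge : 0 ≤ listMin (r :: rs) := hrnn _ (listMin_mem r rs)
        omega
      set y := (r :: rs).getD q.2 0 with hydef
      have hymem : y ∈ r :: rs := getD_mem _ _ (by simp; omega)
      have hy0 : y = 0 := by
        have := hqv
        rw [gcd_zero_of_nonneg y (hrnn y hymem), hq10] at this
        exact this
      set idx := (posN 0 (arr.zip used)).getD q.2 0 with hidxdef
      have hplen : q.2 < (posN 0 (arr.zip used)).length := by
        rw [length_posN, hrem]; simpa using hq2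
      rcases posN_spec arr used q.2 hlen hplen with ⟨hidlt, hidval, hidun⟩
      rw [hrem] at hidval
      have hstep : aStep arr (used, 0, tot) = (used.set idx true, q.1, tot + q.1) := by
        simp only [aStep, hsa, PySem.List.pySetD_natCast]
      have hinv' : ∀ i : Nat, (used.set idx true).getD i false = true → arr.getD i 0 = 0 := by
        intro i hui
        by_cases hii : i = idx
        · subst hii
          rw [hidval, ← hydef, hy0]
        · rw [getD_set_ne used idx i true hii] at hui
          exact hinv i hui
      have hlen' : (used.set idx true).length = arr.length := by simpa using hlen
      have hrem' : remZ (arr.zip (used.set idx true)) = (r :: rs).eraseIdx q.2 := by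
        rw [hidxdef, remZ_zip_set arr used q.2 hlen hplen, hrem]
      have hk' : (remZ (arr.zip (used.set idx true))).length = k - 1 := by
        rw [hrem', List.length_eraseIdx, if_pos (by simpa using hq2)]
        simp only [List.length_cons]
        omega
      have hc' : (remZ (arr.zip (used.set idx true))).count 0 = c := by
        rw [hrem']
        have := count_eraseIdx_zero (r :: rs) q.2 (by simpa using hq2) (by rw [← hydef]; exact hy0)
        rw [hrem] at hc
        omega
      have hkpos : k = (k - 1) + 1 := by omega
      rw [hkpos]
      show (iterN (aStep arr) (k - 1) (aStep arr (used, 0, tot))).2.2 = _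
      rw [hstep, hq10, add_zero,
          ih (k - 1) (used.set idx true) tot hlen' hk' hc' hinv']
      by_cases hck : c = k - 1
      · rw [if_pos hck, if_pos (by omega)]
      · rw [if_neg hck, if_neg (by omega)]
        congr 1
        omega

-- ---- A's initial minimum scan ----
theorem aMinIdx_aux (arr : List Int) : ∀ (b : Nat), 1 ≤ b → b ≤ arr.length →
    ∃ k : Nat, (PySem.List.pyRange 1 (b : Int) 1).foldl
        (fun mi i => if PySem.List.pyGetD arr i 0 < PySem.List.pyGetD arr mi 0 then i else mi) 0
        = (k : Int)
      ∧ k < b ∧ (∀ j : Nat, j < b → arr.getD k 0 ≤ arr.getD j 0)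
      ∧ (∀ j : Nat, j < k → arr.getD k 0 < arr.getD j 0) := by
  intro b hb
  induction b, hb using Nat.le_induction with
  | base =>
    intro _
    refine ⟨0, ?_, by omega, ?_, by omega⟩
    · rw [PySem.List.pyRange_one_eq_nil (by norm_num)]; rfl
    · intro j hj; interval_cases j; exact le_refl _
  | succ b hb ih =>
    intro hble
    rcases ih (by omega) with ⟨k, hfold, hkb, hmin, hstrict⟩
    rw [show ((b + 1 : Nat) : Int) = (b : Int) + 1 by push_cast; ring,
        PySem.List.pyRange_one_succ_right (by exact_mod_cast hb), List.foldl_append,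
        List.foldl_cons, List.foldl_nil, hfold]
    simp only [PySem.List.pyGetD_natCast]
    by_cases hlt : arr.getD b 0 < arr.getD k 0
    · rw [if_pos hlt]
      refine ⟨b, rfl, by omega, ?_, ?_⟩
      · intro j hj
        rcases Nat.lt_or_ge j b with hjb | hjb
        · have := hmin j hjb; omega
        · have : j = b := by omega
          subst this; exact le_refl _
      · intro j hj
        have := hmin j hj; omega
    · rw [if_neg hlt]
      refine ⟨k, rfl, by omega, ?_, hstrict⟩
      intro j hj
      rcases Nat.lt_or_ge j b with hjb | hjb
      · exact hmin j hjb
      · have : j = b := by omega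
        subst this; omega

theorem aMinIdx_char (arr : List Int) (h : arr ≠ []) :
    ∃ k : Nat, aMinIdx arr = (k : Int) ∧ k < arr.length
      ∧ (∀ j : Nat, j < arr.length → arr.getD k 0 ≤ arr.getD j 0)
      ∧ (∀ j : Nat, j < k → arr.getD k 0 < arr.getD j 0) := by
  have hl : 1 ≤ arr.length := List.length_pos_of_ne_nil h
  have := aMinIdx_aux arr arr.length hl (le_refl _)
  unfold aMinIdx
  simpa [PySem.List.len_eq] using this

theorem remZ_zip_replicate : ∀ (xs : List Int),
    remZ (xs.zip (List.replicate xs.length false)) = xs := by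
  intro xs
  induction xs with
  | nil => rfl
  | cons x t ih => simp [List.replicate_succ, List.zip_cons_cons, remZ, ih]

theorem remZ_zip_replicate_set : ∀ (xs : List Int) (k : Nat), k < xs.length →
    remZ (xs.zip ((List.replicate xs.length false).set k true)) = xs.eraseIdx k := by
  intro xs
  induction xs with
  | nil => intro k hk; simp at hk
  | cons x t ih =>
    intro k hk
    cases k with
    | zero =>
      simp [List.replicate_succ, List.zip_cons_cons, remZ, remZ_zip_replicate]
    | succ k =>
      simp only [List.length_cons, List.replicate_succ, List.set_cons_succ,
        List.zip_cons_cons, remZ, Bool.false_eq_true, if_false, List.eraseIdx_cons_succ]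
      exact congrArg _ (ih k (by simpa using hk))

theorem getD_replicate_set (n k i : Nat) (hk : k < n) :
    ((List.replicate n false).set k true).getD i false = decide (i = k) := by
  by_cases hik : i = k
  · subst hik
    rw [getD_set_self _ _ _ (by simpa using hk)]
    simp
  · rw [getD_set_ne _ _ _ _ hik]
    simp [List.getD_eq_getElem?_getD, List.getElem?_replicate, hik]
    split <;> simp

theorem listMin_eq_getD_min (arr : List Int) (k : Nat) (hk : k < arr.length)
    (hmin : ∀ j : Nat, j < arr.length → arr.getD k 0 ≤ arr.getD j 0) :
    arr.getD k 0 = listMin arr := by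
  cases harr : arr with
  | nil => simp [harr] at hk
  | cons a as =>
    rw [← harr]
    have h1 : listMin arr ≤ arr.getD k 0 := by
      rw [harr]
      exact listMin_le a as _ (harr ▸ getD_mem arr k hk)
    have h2 : arr.getD k 0 ≤ listMin arr := by
      rcases List.mem_iff_getElem.mp (show listMin arr ∈ arr by rw [harr]; exact listMin_mem a as)
        with ⟨j, hj, hjv⟩
      have := hmin j hj
      rw [List.getD_eq_getElem _ _ hj, hjv] at this
      exact this
    omega

-- ===== VERDICT (by name: the statement is the Claim_ definition above) =====
theorem minimize_gcd_sum_spec : Claim_equal_minimize_gcd_sum := by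
  unfold Claim_equal_minimize_gcd_sum
  intro arr _ hpre
  unfold Spec_minimize_gcd_sum
  rcases aMinIdx_char arr hpre with ⟨k, hmi, hk, hmin, hstrict⟩
  have hm : PySem.List.min? arr (fun x => x) = some (listMin arr) := by
    cases arr with
    | nil => exact absurd rfl hpre
    | cons a as => rw [PySem.List.min?_id_cons]; rfl
  have hmem : listMin arr ∈ arr := listMin_mem_of_ne_nil arr hpre
  have hmle : ∀ y ∈ arr, listMin arr ≤ y := fun y hy => listMin_le_mem arr y hy
  have harrk : arr.getD k 0 = listMin arr := listMin_eq_getD_min arr k hk hmin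
  -- unfold A to the iterated step function
  unfold minimize_gcd_sum
  rw [hmi]
  simp only [PySem.List.pyGetD_natCast, PySem.List.pySetD_natCast, PySem.List.len_eq,
    Int.toNat_natCast, harrk]
  rw [foldl_const]
  have hlenrange : (PySem.List.pyRange 1 ((arr.length : Nat) : Int) 1).length
      = arr.length - 1 := by
    rw [PySem.List.length_pyRange_one]; omega
  rw [hlenrange]
  set used0 : List Bool := (List.replicate arr.length false).set k true with hu0
  have hlen0 : used0.length = arr.length := by simp [hu0]
  have hrem0 : remZ (arr.zip used0) = arr.eraseIdx k := remZ_zip_replicate_set arr k hk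
  have hk0 : (remZ (arr.zip used0)).length = arr.length - 1 := by
    rw [hrem0, List.length_eraseIdx, if_pos hk]
  -- unfold B (the match on `some (listMin arr)` and the let reduce definitionally)
  unfold minimize_gcd_sum_alt
  rw [hm]
  show _ =
    (if listMin arr = 0 then
      (if PySem.List.count arr 0 = arr.length then (0 : Int)
       else
        match PySem.List.min? (arr.filter (fun x => decide (x ≠ 0))) (fun x => x) with
        | none => 0
        | some p => bLoop arr p p (arr.length - PySem.List.count arr 0 - 1))
     else bLoop arr (listMin arr) (listMin arr) (arr.length - 1))
  by_cases hm0 : listMin arr = 0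
  · -- minimum is zero: zero phase, then (possibly) the invariant loop
    rw [if_pos hm0]
    have hnn : ∀ x ∈ arr, 0 ≤ x := by
      intro x hx
      have := hmle x hx
      omega
    have hinv0 : ∀ i : Nat, used0.getD i false = true → arr.getD i 0 = 0 := by
      intro i hi
      rw [hu0, getD_replicate_set _ _ _ hk] at hi
      have : i = k := by simpa using hi
      subst this
      rw [harrk, hm0]
    have hz1 : 0 < List.count 0 arr := by
      apply List.count_pos_iff.mpr
      rw [← hm0]; exact hmem
    have hzle : List.count 0 arr ≤ arr.length := List.count_le_length
    have hcval : List.count 0 (remZ (arr.zip used0)) + 1 = List.count 0 arr := by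
      rw [hrem0]
      exact count_eraseIdx_zero arr k hk (by rw [harrk, hm0])
    rw [hm0] at *
    rw [zero_loop arr hnn (List.count 0 (remZ (arr.zip used0))) (arr.length - 1) used0 0
      hlen0 hk0 rfl hinv0]
    rw [PySem.List.count_eq]
    by_cases hall : List.count 0 arr = arr.length
    · rw [if_pos hall, if_pos (by omega)]
    · rw [if_neg hall, if_neg (by omega)]
      have hfne : arr.filter (fun x => decide (x ≠ 0)) ≠ [] := by
        intro hnilf
        have hall0 : ∀ x ∈ arr, x = 0 := by
          intro x hx
          have := List.filter_eq_nil_iff.mp hnilf x hx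
          simpa using this
        exact hall (List.count_eq_length.mpr (fun b hb => (hall0 b hb).symm))
      cases hfilt : arr.filter (fun x => decide (x ≠ 0)) with
      | nil => exact absurd hfilt hfne
      | cons f0 fs =>
        rw [PySem.List.min?_id_cons]
        rw [zero_add, show fs.foldl min f0 = listMin (f0 :: fs) from rfl]
        congr 1
        omega
  · -- nonzero minimum: the invariant loop from the very start
    rw [if_neg hm0]
    have hinv0 : ∀ i : Nat, used0.getD i false = true →
        (Int.gcd (listMin arr) (arr.getD i 0) : Int) = |listMin arr| := by
      intro i hi
      rw [hu0, getD_replicate_set _ _ _ hk] at hi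
      have : i = k := by simpa using hi
      subst this
      rw [harrk]
      exact gcd_eq_abs_of_dvd _ _ dvd_rfl
    exact main_loop arr (arr.length - 1) used0 (listMin arr) (listMin arr) hlen0 hk0 hm0 hinv0
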